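-- pv_equiv track=rewrite | github.com/allykkk/DI-Bootcamp | Week2/Day4/Day4-Matrix.py | decode_matrix
-- ===== SOURCE A (Python) =====
-- def clean_input(matrix_input):
--     # We don't know what the input looks like, let's make sure it's valid.
--     cleaned_intput = []
--     for line in matrix_input.split("\n"):
--         clean_line = line.lstrip()
--         if clean_line != "":
--             cleaned_intput.append(clean_line)
--
--     return "\n".join(cleaned_intput)
--
-- def create_matrix(matrix_input_string):
--     # Assuming we have a valid input, convert it into a matrix (list of lists)
--     matrix_input_string = clean_input(matrix_input_string)
--     rows = matrix_input_string.split("\n")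
--     real_matrix = []
--     for num in range(3):
--         real_matrix.append([char[num] for char in rows])
--     return real_matrix
--
-- def decode_matrix(matrix_input_string):
--     #
--     real_matrix = create_matrix(matrix_input_string)
--     result = []
--     last_token = ""
--     for column in real_matrix:
--         for char in column:
--             if char.isalpha():
--                 # one of two could happen:
--                 # 1. Last token was a group of non-alpha, so we add space and add our char
--                 # 2. Last token was start of string/alpha/non-alpha - all the same. We just add the char.
--                 if last_token == "group-of-non-alpha":
--                     result.append(" ")
--                     result.append(char)
--                 else:
--                     result.append(char)
--                 last_token = "alpha"
--             else:
--                 if last_token == "group-of-non-alpha":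
--                     # last was a group, for example: ($#), and now ^. Last token didn't change.
--                     last_token = "group-of-non-alpha"
--                 elif last_token == "non-alpha":
--                     # last was a single token: ($) and now #. Last token should change to group.
--                     last_token = "group-of-non-alpha"
--                 else:
--                     # last was either char or start of string: ("") and now 7, or (r) and then 3
--                     last_token = "non-alpha"
--
--     return "".join(result)
-- ===== SOURCE B (Python) =====
-- def decode_matrix(matrix_input_string):
--     rows = [line.lstrip() for line in matrix_input_string.split("\n")
--             if line.lstrip() != ""]
--     seq = [row[i] for i in range(3) for row in rows]
--     out = []
--     for i, c in enumerate(seq):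
--         if c.isalpha():
--             # a space separates words exactly when the non-alpha run just
--             # before this character has length >= 2
--             if i >= 2 and not seq[i - 1].isalpha() and not seq[i - 2].isalpha():
--                 out.append(" ")
--             out.append(c)
--     return "".join(out)
-- ===== Notes on version B (the rewrite author's own statement) =====
-- stated objective: simpler
-- what changed: Replaces A's persistent four-state token machine (and the split/join/re-split row cleaning) with a stateless single pass over the column-major sequence: a space is emitted before an alpha character exactly when the two preceding characters are both non-alpha.
import Mathlib
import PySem

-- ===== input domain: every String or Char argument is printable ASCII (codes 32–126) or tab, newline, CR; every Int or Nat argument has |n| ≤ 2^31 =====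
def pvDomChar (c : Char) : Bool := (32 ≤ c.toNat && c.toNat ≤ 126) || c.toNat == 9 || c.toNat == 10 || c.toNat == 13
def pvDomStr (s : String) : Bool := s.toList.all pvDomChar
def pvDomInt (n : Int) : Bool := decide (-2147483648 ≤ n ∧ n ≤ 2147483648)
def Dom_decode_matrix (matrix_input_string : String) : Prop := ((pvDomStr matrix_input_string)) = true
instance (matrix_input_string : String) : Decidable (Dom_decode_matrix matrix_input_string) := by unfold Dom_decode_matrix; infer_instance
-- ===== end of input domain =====

-- B replaces A's persistent four-state token machine with a stateless window test
-- (space before an alpha char iff the two previous column-major chars are both non-alpha); objective: simpler.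

-- ===== PORT A =====
-- clean_input: keep lstripped non-empty lines, re-join with "\n"
def pvCleanInput (cs : List Char) : List Char :=
  PySem.Chars.join ['\n'] ((PySem.Chars.splitOn cs ['\n']).foldl (fun acc line =>
    let cl := PySem.Chars.lstrip line
    if cl ≠ [] then acc ++ [cl] else acc) [])

-- create_matrix: rows[num] raises IndexError in Python when a row is shorter than 3;
-- pyGetD's default ' ' is only reached outside Pre_decode_matrix (which excludes exactly those inputs)
def pvCreateMatrix (cs : List Char) : List (List Char) :=
  let cleaned := pvCleanInput cs
  let rows := PySem.Chars.splitOn cleaned ['\n']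
  (PySem.List.pyRange 0 3).foldl (fun acc num => acc ++ [rows.map (fun row => PySem.List.pyGetD row num ' ')]) []

-- the body of A's inner loop (result list, last_token string)
def pvAStep (st : List Char × String) (c : Char) : List Char × String :=
  if PySem.Chars.isalpha c then
    if st.2 = "group-of-non-alpha" then (st.1 ++ [' '] ++ [c], "alpha")
    else (st.1 ++ [c], "alpha")
  else
    if st.2 = "group-of-non-alpha" then (st.1, "group-of-non-alpha")
    else if st.2 = "non-alpha" then (st.1, "group-of-non-alpha")
    else (st.1, "non-alpha")

def decode_matrix (matrix_input_string : String) : String :=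
  let real_matrix := pvCreateMatrix matrix_input_string.toList
  let st := real_matrix.foldl (fun st column => column.foldl pvAStep st) ([], "")
  String.ofList st.1

-- ===== PORT B =====
-- [line.lstrip() for line in s.split("\n") if line.lstrip() != ""]
def pvRowsB (cs : List Char) : List (List Char) :=
  ((PySem.Chars.splitOn cs ['\n']).filter (fun line => PySem.Chars.lstrip line ≠ [])).map
    PySem.Chars.lstrip

-- the body of B's loop; row[i]/seq[i-1]/seq[i-2] are in range wherever Python's are
-- (default only reached outside Pre_decode_matrix / behind the short-circuit guard)
def pvBStep (seq : List Char) (acc : List Char) (p : Int × Char) : List Char :=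
  if PySem.Chars.isalpha p.2 then
    (if 2 ≤ p.1 ∧ ¬PySem.Chars.isalpha (PySem.List.pyGetD seq (p.1 - 1) ' ')
        ∧ ¬PySem.Chars.isalpha (PySem.List.pyGetD seq (p.1 - 2) ' ') then acc ++ [' '] else acc)
      ++ [p.2]
  else acc

def decode_matrix_alt (matrix_input_string : String) : String :=
  let rows := pvRowsB matrix_input_string.toList
  let seq := (PySem.List.pyRange 0 3).flatMap (fun i => rows.map (fun row => PySem.List.pyGetD row i ' '))
  String.ofList ((PySem.List.enumerate seq).foldl (pvBStep seq) [])

-- ===== PRECONDITION & SPEC =====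
-- Pre_ excludes exactly the inputs where Python A raises IndexError: some lstripped
-- non-empty line has fewer than 3 characters, or there are no such lines at all.
def Pre_decode_matrix (matrix_input_string : String) : Prop :=
  let rows := ((PySem.Chars.splitOn matrix_input_string.toList ['\n']).map PySem.Chars.lstrip).filter (fun r => r ≠ [])
  rows ≠ [] ∧ ∀ r ∈ rows, 3 ≤ r.length
instance (matrix_input_string : String) : Decidable (Pre_decode_matrix matrix_input_string) := by
  unfold Pre_decode_matrix; infer_instance

def pvWitness_decode_matrix : String := "ab7\ncd8\nef9"

def Spec_decode_matrix (matrix_input_string : String) (out : String) : Prop := out = decode_matrix_alt matrix_input_string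
instance (matrix_input_string : String) (out : String) : Decidable (Spec_decode_matrix matrix_input_string out) := by unfold Spec_decode_matrix; infer_instance

-- ===== CLAIM (what is proved, stated in full; the proofs are below) =====
def Claim_equal_decode_matrix : Prop := ∀ (matrix_input_string : String), Dom_decode_matrix matrix_input_string → Pre_decode_matrix matrix_input_string → Spec_decode_matrix matrix_input_string (decode_matrix matrix_input_string)

-- ===== LEMMAS AND PROOFS =====

def pvSplitAux : List Char → List Char → List (List Char)
  | cur, [] => [cur.reverse]
  | cur, c :: rest => if c = '\n' then cur.reverse :: pvSplitAux [] rest else pvSplitAux (c :: cur) rest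

theorem pv_go_spec (fuel : Nat) : ∀ (l cur : List Char) (acc : List (List Char)), l.length < fuel →
    PySem.Chars.splitOn.go ['\n'] fuel l cur acc = acc.reverse ++ pvSplitAux cur l := by
  induction fuel with
  | zero => intro l cur acc h; omega
  | succ n ih =>
    intro l cur acc h
    cases l with
    | nil => simp [PySem.Chars.splitOn.go, pvSplitAux]
    | cons c rest =>
      simp only [PySem.Chars.splitOn.go]
      by_cases hc : c = '\n'
      · subst hc
        simp [List.isPrefixOf, pvSplitAux, ih rest [] _ (by simpa using Nat.lt_of_succ_lt_succ h)]
      · have hcn : ¬('\n' = c) := fun h' => hc h'.symm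
        simp [List.isPrefixOf, hc, hcn, pvSplitAux, ih rest (c :: cur) acc (by simpa using Nat.lt_of_succ_lt_succ h)]

theorem pv_splitOn_eq (cs : List Char) : PySem.Chars.splitOn cs ['\n'] = pvSplitAux [] cs := by
  simpa using pv_go_spec (cs.length + 1) cs [] [] (by omega)

theorem pvSplitAux_append {p : List Char} (hp : '\n' ∉ p) :
    ∀ (cur rest : List Char), pvSplitAux cur (p ++ rest) = pvSplitAux (p.reverse ++ cur) rest := by
  induction p with
  | nil => intro cur rest; simp
  | cons c cs ih =>
    intro cur rest
    have hc : ¬ c = '\n' := fun h => hp (h ▸ List.mem_cons_self)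
    have hcs : '\n' ∉ cs := fun h => hp (List.mem_cons_of_mem _ h)
    simp [pvSplitAux, hc, ih hcs]

theorem pvSplitAux_join : ∀ (parts : List (List Char)), parts ≠ [] → (∀ p ∈ parts, '\n' ∉ p) →
    pvSplitAux [] (PySem.Chars.join ['\n'] parts) = parts := by
  intro parts
  induction parts with
  | nil => intro h; exact absurd rfl h
  | cons p ps ih =>
    intro _ hmem
    cases ps with
    | nil =>
      rw [PySem.Chars.join_singleton]
      have := pvSplitAux_append (hmem p List.mem_cons_self) [] []
      simpa [pvSplitAux] using this
    | cons q qs =>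
      rw [PySem.Chars.join_cons_cons]
      rw [List.append_assoc, pvSplitAux_append (hmem p List.mem_cons_self)]
      simp only [List.append_nil, List.singleton_append, pvSplitAux, List.reverse_reverse]
      rw [ih (by simp) (fun r hr => hmem r (List.mem_cons_of_mem _ hr))]
      simp

theorem pv_mem_splitAux_no_nl : ∀ (l cur x : List Char), '\n' ∉ cur → x ∈ pvSplitAux cur l → '\n' ∉ x := by
  intro l
  induction l with
  | nil => intro cur x hcur hx; simp [pvSplitAux] at hx; subst hx; simpa using hcur
  | cons c rest ih =>
    intro cur x hcur hx
    by_cases hc : c = '\n'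
    · subst hc
      simp [pvSplitAux] at hx
      rcases hx with h | h
      · subst h; simpa using hcur
      · exact ih [] x (by simp) h
    · simp [pvSplitAux, hc] at hx
      exact ih (c :: cur) x (by simp [hcur, Ne.symm hc]) hx

-- state machine bridge
def pvNaAt (l : List Char) (k : Nat) : Bool := l[k]?.elim false (fun c => !PySem.Chars.isalpha c)

def pvStateOf (pre : List Char) : String :=
  if pvNaAt pre (pre.length - 1) then
    if pvNaAt pre (pre.length - 2) ∧ 2 ≤ pre.length then "group-of-non-alpha" else "non-alpha"
  else if pre.length = 0 then "" else "alpha"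

theorem pvNaAt_append_last (pre : List Char) (c : Char) :
    pvNaAt (pre ++ [c]) pre.length = !PySem.Chars.isalpha c := by
  simp [pvNaAt]

theorem pvNaAt_append_lt (pre : List Char) (c : Char) (k : Nat) (hk : k < pre.length) :
    pvNaAt (pre ++ [c]) k = pvNaAt pre k := by
  simp [pvNaAt, List.getElem?_append_left hk]

-- A's state transition matches pvStateOf
theorem pvState_step (pre : List Char) (c : Char) (acc : List Char) :
    pvAStep (acc, pvStateOf pre) c
      = ((if PySem.Chars.isalpha c then
            (if pvStateOf pre = "group-of-non-alpha" then acc ++ [' '] else acc) ++ [c]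
          else acc), pvStateOf (pre ++ [c])) := by
  by_cases hc : PySem.Chars.isalpha c
  · -- new state is "alpha"
    have h1 : pvStateOf (pre ++ [c]) = "alpha" := by
      unfold pvStateOf
      rw [show (pre ++ [c]).length - 1 = pre.length by simp, pvNaAt_append_last, hc]
      simp
    unfold pvAStep
    simp only [hc, if_true, h1]
    split_ifs <;> simp_all
  · -- c is non-alpha
    have hlast : pvNaAt (pre ++ [c]) pre.length = true := by rw [pvNaAt_append_last]; simp [hc]
    have hlen : (pre ++ [c]).length - 1 = pre.length := by simp
    by_cases hp : pvNaAt pre (pre.length - 1)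
    · -- previous run was non-alpha: old state is group/non-alpha, new state is group
      have hpre1 : 1 ≤ pre.length := by
        rcases pre with _ | _
        · simp [pvNaAt] at hp
        · simp
      have h2 : pvNaAt (pre ++ [c]) ((pre ++ [c]).length - 2) = true := by
        have he : (pre ++ [c]).length - 2 = pre.length - 1 := by simp
        rw [he, pvNaAt_append_lt _ _ _ (by omega)]; exact hp
      have h1 : pvStateOf (pre ++ [c]) = "group-of-non-alpha" := by
        unfold pvStateOf
        rw [hlen, hlast, if_pos rfl, if_pos ⟨h2, by simpa using hpre1⟩]
      have hsold : pvStateOf pre = "group-of-non-alpha" ∨ pvStateOf pre = "non-alpha" := by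
        unfold pvStateOf
        rw [if_pos hp]
        split_ifs
        · exact Or.inl rfl
        · exact Or.inr rfl
      unfold pvAStep
      rcases hsold with h | h <;> simp [hc, h, h1]
    · -- previous char alpha or none: new state "non-alpha"
      have h1 : pvStateOf (pre ++ [c]) = "non-alpha" := by
        unfold pvStateOf
        rw [hlen, hlast, if_pos rfl, if_neg ?_]
        rintro ⟨hna, hlen2⟩
        rcases pre with _ | ⟨a, as⟩
        · simp at hlen2
        · have he : ((a :: as) ++ [c]).length - 2 = (a :: as).length - 1 := by simp
          rw [he, pvNaAt_append_lt _ _ _ (by simp)] at hna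
          exact hp hna
      have hsold : pvStateOf pre ≠ "group-of-non-alpha" ∧ pvStateOf pre ≠ "non-alpha" := by
        unfold pvStateOf
        rw [if_neg hp]
        split_ifs <;> exact ⟨by decide, by decide⟩
      unfold pvAStep
      simp [hc, hsold.1, hsold.2, h1]

theorem pvStateOf_group_iff (pre : List Char) :
    pvStateOf pre = "group-of-non-alpha"
      ↔ (2 ≤ pre.length ∧ pvNaAt pre (pre.length - 1) = true ∧ pvNaAt pre (pre.length - 2) = true) := by
  unfold pvStateOf
  split_ifs with h1 h2
  · exact ⟨fun _ => ⟨h2.2, h1, h2.1⟩, fun _ => rfl⟩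
  · exact ⟨fun h => absurd h (by decide), fun ⟨ha, _, hb⟩ => absurd ⟨hb, ha⟩ h2⟩
  · exact ⟨fun h => absurd h (by decide), fun ⟨_, hb, _⟩ => absurd hb h1⟩
  · exact ⟨fun h => absurd h (by decide), fun ⟨_, hb, _⟩ => absurd hb h1⟩

theorem pvGetD_pre (pre tail : List Char) (k : Nat) (hk : k < pre.length) (d : Char) :
    PySem.List.pyGetD (pre ++ tail) (k : Int) d = pre[k] := by
  rw [PySem.List.pyGetD_of_nonneg _ _ (by positivity)]
  rw [List.getD_eq_getElem _ _ (by simp; omega)]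
  simp [List.getElem_append_left hk]

theorem pvNaAt_lt (pre : List Char) (k : Nat) (hk : k < pre.length) :
    pvNaAt pre k = !PySem.Chars.isalpha pre[k] := by
  simp [pvNaAt, List.getElem?_eq_getElem hk]

theorem pvWindow_iff (pre tail : List Char) :
    (2 ≤ ((pre.length : Nat) : Int)
      ∧ ¬PySem.Chars.isalpha (PySem.List.pyGetD (pre ++ tail) (((pre.length : Nat) : Int) - 1) ' ') = true
      ∧ ¬PySem.Chars.isalpha (PySem.List.pyGetD (pre ++ tail) (((pre.length : Nat) : Int) - 2) ' ') = true)
      ↔ pvStateOf pre = "group-of-non-alpha" := by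
  rw [pvStateOf_group_iff]
  constructor
  · rintro ⟨h2, hn1, hn2⟩
    have hl : 2 ≤ pre.length := by exact_mod_cast h2
    have e1 : ((pre.length : Nat) : Int) - 1 = ((pre.length - 1 : Nat) : Int) := by omega
    have e2 : ((pre.length : Nat) : Int) - 2 = ((pre.length - 2 : Nat) : Int) := by omega
    rw [e1, pvGetD_pre _ _ _ (by omega)] at hn1
    rw [e2, pvGetD_pre _ _ _ (by omega)] at hn2
    refine ⟨hl, ?_, ?_⟩
    · rw [pvNaAt_lt _ _ (by omega)]; simpa using hn1
    · rw [pvNaAt_lt _ _ (by omega)]; simpa using hn2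
  · rintro ⟨hl, hn1, hn2⟩
    have e1 : ((pre.length : Nat) : Int) - 1 = ((pre.length - 1 : Nat) : Int) := by omega
    have e2 : ((pre.length : Nat) : Int) - 2 = ((pre.length - 2 : Nat) : Int) := by omega
    rw [pvNaAt_lt _ _ (by omega)] at hn1
    rw [pvNaAt_lt _ _ (by omega)] at hn2
    refine ⟨by exact_mod_cast hl, ?_, ?_⟩
    · rw [e1, pvGetD_pre _ _ _ (by omega)]; simpa using hn1
    · rw [e2, pvGetD_pre _ _ _ (by omega)]; simpa using hn2

theorem pv_core (tail : List Char) : ∀ (pre acc : List Char),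
    (tail.foldl pvAStep (acc, pvStateOf pre)).1
      = (PySem.List.enumerate tail ((pre.length : Nat) : Int)).foldl (pvBStep (pre ++ tail)) acc := by
  induction tail with
  | nil => intro pre acc; simp [PySem.List.enumerate]
  | cons c rest ih =>
    intro pre acc
    rw [List.foldl_cons, pvState_step, PySem.List.enumerate_cons, List.foldl_cons]
    have hb : pvBStep (pre ++ c :: rest) acc ((pre.length : Int), c)
        = (if PySem.Chars.isalpha c then
            (if pvStateOf pre = "group-of-non-alpha" then acc ++ [' '] else acc) ++ [c]
          else acc) := by
      unfold pvBStep
      by_cases hc : PySem.Chars.isalpha c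
      · simp only [hc, if_true]
        congr 1
        rw [if_congr (by simpa using pvWindow_iff pre (c :: rest)) rfl rfl]
      · simp [hc]
    rw [hb]
    have := ih (pre ++ [c]) (if PySem.Chars.isalpha c then
            (if pvStateOf pre = "group-of-non-alpha" then acc ++ [' '] else acc) ++ [c]
          else acc)
    simpa [List.append_assoc, Int.add_comm, Int.add_left_comm] using this


-- ===== VERDICT (by name: the statement is the Claim_ definition above) =====
theorem decode_matrix_spec : Claim_equal_decode_matrix := by
  unfold Claim_equal_decode_matrix Spec_decode_matrix
  intro s _ hpre
  unfold Pre_decode_matrix at hpre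
  simp only [List.filter_map] at hpre
  obtain ⟨hCne, _⟩ := hpre
  -- the shared cleaned row list
  set L := PySem.Chars.splitOn s.toList ['\n'] with hL
  set C := (L.filter (fun line => PySem.Chars.lstrip line ≠ [])).map PySem.Chars.lstrip with hC
  have hCne' : C ≠ [] := by
    intro h; exact hCne (by simpa [hC] using h)
  have hnomem : ∀ r ∈ C, '\n' ∉ r := by
    intro r hr
    rw [hC] at hr
    obtain ⟨l', hl', rfl⟩ := List.mem_map.1 hr
    have hl'' : l' ∈ L := (List.mem_filter.1 hl').1
    have hno : '\n' ∉ l' := by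
      rw [hL, pv_splitOn_eq] at hl''
      exact pv_mem_splitAux_no_nl _ _ _ (by simp) hl''
    exact fun hm => hno ((List.dropWhile_sublist _).subset hm)
  have hclean : pvCleanInput s.toList = PySem.Chars.join ['\n'] C := by
    unfold pvCleanInput
    congr 1
    have := PySem.List.foldl_append_if
      (fun line => decide (PySem.Chars.lstrip line ≠ [])) PySem.Chars.lstrip L []
    simpa [hC] using this
  have hrows : PySem.Chars.splitOn (pvCleanInput s.toList) ['\n'] = C := by
    rw [hclean, pv_splitOn_eq, pvSplitAux_join C hCne' hnomem]
  have hr3 : PySem.List.pyRange 0 3 = [0, 1, 2] := by decide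
  have hmat : pvCreateMatrix s.toList
      = [C.map (fun row => PySem.List.pyGetD row 0 ' '),
         C.map (fun row => PySem.List.pyGetD row 1 ' '),
         C.map (fun row => PySem.List.pyGetD row 2 ' ')] := by
    unfold pvCreateMatrix
    dsimp only
    rw [hrows, hr3]
    rfl
  have hrowsB : pvRowsB s.toList = C := rfl
  have hseq : (PySem.List.pyRange 0 3).flatMap
        (fun i => (pvRowsB s.toList).map (fun row => PySem.List.pyGetD row i ' '))
      = C.map (fun row => PySem.List.pyGetD row 0 ' ')
        ++ C.map (fun row => PySem.List.pyGetD row 1 ' ')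
        ++ C.map (fun row => PySem.List.pyGetD row 2 ' ') := by
    rw [hr3, hrowsB]
    simp [List.flatMap]
  unfold decode_matrix decode_matrix_alt
  dsimp only
  rw [hmat, hseq]
  congr 1
  have h0 : ("" : String) = pvStateOf [] := by decide
  simp only [List.foldl_cons, List.foldl_nil, ← List.foldl_append]
  rw [h0]
  simpa using pv_core (C.map (fun row => PySem.List.pyGetD row 0 ' ')
        ++ C.map (fun row => PySem.List.pyGetD row 1 ' ')
        ++ C.map (fun row => PySem.List.pyGetD row 2 ' ')) [] []
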